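-- pv_equiv track=rewrite | github.com/reinaldoq/techrec-mini-test | task1/count.py | list_element_counting
-- ===== SOURCE A (Python) =====
-- from collections import Counter
-- from typing import List
--
-- def list_element_counting(input_list: List, comparison_list: List) -> dict:
--     input_list = [i.capitalize() for i in input_list]
--     transformed_list = []
--     freq = Counter()
--     freq.update({i: 0 for i in comparison_list})
--
--     for food in input_list:
--         if f"{food.capitalize()}" in comparison_list:
--             transformed_list.append(food)
--
--     count = Counter(transformed_list)
--
--     freq.update(count)
--
--     return freq
-- ===== SOURCE B (Python) =====
-- from collections import Counter
--
-- def list_element_counting(input_list, comparison_list):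
--     cap_counts = Counter(i.capitalize() for i in input_list)
--     result = Counter()
--     for e in comparison_list:
--         result[e] = cap_counts[e]
--     return result
-- ===== Notes on version B (the rewrite author's own statement) =====
-- stated objective: simpler
-- what changed: B builds one frequency table of the capitalized inputs and then drives a single loop over comparison_list doing default-0 table lookups, instead of A's zero-initialized dict, membership-filtered intermediate list, second Counter and Counter merge.
import Mathlib
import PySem

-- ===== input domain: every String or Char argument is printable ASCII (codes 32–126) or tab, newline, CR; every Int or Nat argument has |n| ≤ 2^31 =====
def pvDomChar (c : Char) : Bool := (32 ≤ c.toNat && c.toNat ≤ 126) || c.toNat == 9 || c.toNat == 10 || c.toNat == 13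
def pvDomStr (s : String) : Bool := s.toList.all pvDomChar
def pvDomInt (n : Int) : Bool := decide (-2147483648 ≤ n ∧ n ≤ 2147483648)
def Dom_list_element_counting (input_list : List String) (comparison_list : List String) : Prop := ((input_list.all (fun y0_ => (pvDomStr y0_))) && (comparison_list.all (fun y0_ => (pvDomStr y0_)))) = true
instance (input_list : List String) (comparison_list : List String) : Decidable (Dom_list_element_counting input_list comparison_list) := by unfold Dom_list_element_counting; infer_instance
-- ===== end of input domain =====

-- B replaces A's zero-initialized dict + membership-filtered list + Counter merge by one
-- frequency table of the capitalized inputs and a single lookup loop over comparison_list.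

-- shared helper: Python str.capitalize() (first char uppercased, the rest lowercased; exact on ASCII)
def pyCapitalize (s : String) : String :=
  match s.toList with
  | [] => s
  | c :: rest => String.ofList (PySem.Chars.upperChar c :: PySem.Chars.lower rest)

-- ===== PORT A =====
def list_element_counting (input_list : List String) (comparison_list : List String) : List (String × Int) :=
  -- input_list = [i.capitalize() for i in input_list]
  let capped := input_list.map pyCapitalize
  -- freq = Counter(); freq.update({i: 0 for i in comparison_list})
  let zeroDict := comparison_list.foldl (fun d i => d.insert i (0 : Int)) PySem.Dict.empty
  let freq1 := zeroDict.items.foldl (fun d kv => d.modify kv.1 0 (· + kv.2)) (PySem.Dict.empty : PySem.Dict String Int)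
  -- for food in input_list: if f"{food.capitalize()}" in comparison_list: transformed_list.append(food)
  let transformed := capped.foldl (fun acc food => if comparison_list.contains (pyCapitalize food) then acc ++ [food] else acc) []
  -- count = Counter(transformed_list); freq.update(count)
  let count := PySem.Dict.counter transformed
  let freq2 := count.items.foldl (fun d kv => d.modify kv.1 0 (· + kv.2)) freq1
  freq2.items

-- ===== PORT B =====
def list_element_counting_alt (input_list : List String) (comparison_list : List String) : List (String × Int) :=
  -- cap_counts = Counter(i.capitalize() for i in input_list)
  let capCounts := PySem.Dict.counter (input_list.map pyCapitalize)
  -- result = Counter(); for e in comparison_list: result[e] = cap_counts[e]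
  let result := comparison_list.foldl (fun d e => d.insert e (capCounts.getD e 0)) (PySem.Dict.empty : PySem.Dict String Int)
  result.items

-- ===== PRECONDITION & SPEC =====
def Spec_list_element_counting (input_list : List String) (comparison_list : List String) (out : List (String × Int)) : Prop := out = list_element_counting_alt input_list comparison_list
instance (input_list : List String) (comparison_list : List String) (out : List (String × Int)) : Decidable (Spec_list_element_counting input_list comparison_list out) := by unfold Spec_list_element_counting; infer_instance

-- ===== CLAIM (what is proved, stated in full; the proofs are below) =====
def Claim_equal_list_element_counting : Prop := ∀ (input_list : List String) (comparison_list : List String), Dom_list_element_counting input_list comparison_list → Spec_list_element_counting input_list comparison_list (list_element_counting input_list comparison_list)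

-- ===== LEMMAS AND PROOFS =====

theorem char_le_iff (a b : Char) : a ≤ b ↔ a.toNat ≤ b.toNat :=
  Char.le_def.trans UInt32.le_iff_toNat_le

theorem upperChar_idem (c : Char) : PySem.Chars.upperChar (PySem.Chars.upperChar c) = PySem.Chars.upperChar c := by
  unfold PySem.Chars.upperChar PySem.Chars.islower
  split_ifs with h1 h2 <;> try rfl
  exfalso
  simp only [Bool.and_eq_true, decide_eq_true_eq, char_le_iff] at h1 h2
  have ha : ('a' : Char).toNat = 97 := rfl
  have hz : ('z' : Char).toNat = 122 := rfl
  rw [ha, hz] at h1 h2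
  rw [Char.toNat_ofNat] at h2
  have hv : (c.toNat - 32).isValidChar := Or.inl (by omega)
  rw [if_pos hv] at h2
  omega

theorem lowerChar_idem (c : Char) : PySem.Chars.lowerChar (PySem.Chars.lowerChar c) = PySem.Chars.lowerChar c := by
  unfold PySem.Chars.lowerChar PySem.Chars.isupper
  split_ifs with h1 h2 <;> try rfl
  exfalso
  simp only [Bool.and_eq_true, decide_eq_true_eq, char_le_iff] at h1 h2
  have ha : ('A' : Char).toNat = 65 := rfl
  have hz : ('Z' : Char).toNat = 90 := rfl
  rw [ha, hz] at h1 h2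
  rw [Char.toNat_ofNat] at h2
  have hv : (c.toNat + 32).isValidChar := Or.inl (by omega)
  rw [if_pos hv] at h2
  omega

theorem pyCapitalize_idem (s : String) : pyCapitalize (pyCapitalize s) = pyCapitalize s := by
  cases h : s.toList with
  | nil => simp [pyCapitalize, h]
  | cons c rest =>
    have h1 : pyCapitalize s = String.ofList (PySem.Chars.upperChar c :: PySem.Chars.lower rest) := by
      simp [pyCapitalize, h]
    have h2 : (String.ofList (PySem.Chars.upperChar c :: PySem.Chars.lower rest)).toList
        = PySem.Chars.upperChar c :: PySem.Chars.lower rest := String.toList_ofList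
    have h3 : pyCapitalize (String.ofList (PySem.Chars.upperChar c :: PySem.Chars.lower rest))
        = String.ofList (PySem.Chars.upperChar (PySem.Chars.upperChar c) :: PySem.Chars.lower (PySem.Chars.lower rest)) := by
      simp [pyCapitalize, h2]
    rw [h1, h3]
    simp [PySem.Chars.lower, List.map_map, Function.comp_def, upperChar_idem, lowerChar_idem]

-- getD of an insert loop whose value depends only on the key
theorem getD_foldl_insert_const (xs : List String) (f : String → Int) (d : PySem.Dict String Int) (k : String) :
    (xs.foldl (fun d e => d.insert e (f e)) d).getD k 0 = if k ∈ xs then f k else d.getD k 0 := by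
  induction xs generalizing d with
  | nil => simp
  | cons x xs ih =>
    simp only [List.foldl_cons, ih, PySem.Dict.getD_insert, List.mem_cons]
    by_cases hx : k ∈ xs <;> by_cases hk : k = x <;> simp [hx, hk]

-- getD of a Counter.update-with-pairs loop
theorem getD_foldl_modify_add (l : List (String × Int)) (d : PySem.Dict String Int) (k : String) :
    (l.foldl (fun d kv => d.modify kv.1 0 (· + kv.2)) d).getD k 0
      = d.getD k 0 + ((l.filter (fun p => p.1 == k)).map (·.2)).sum := by
  induction l generalizing d with
  | nil => simp
  | cons p l ih =>
    simp only [List.foldl_cons, ih, PySem.Dict.getD_modify, List.filter_cons]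
    by_cases hk : p.1 = k
    · simp [hk]; ring
    · have hk' : ¬ k = p.1 := fun h => hk h.symm
      simp [hk, hk']

theorem items_val_zero (xs : List String) (d : PySem.Dict String Int)
    (h : ∀ p ∈ d.items, p.2 = 0) :
    ∀ p ∈ (xs.foldl (fun d i => d.insert i (0 : Int)) d).items, p.2 = 0 := by
  induction xs generalizing d with
  | nil => exact h
  | cons x xs ih =>
    intro p hp
    refine ih _ ?_ p hp
    intro q hq
    rcases (PySem.Dict.mem_items_insert _ _ _ q).mp hq with h1 | h2
    · simp [h1]
    · exact h q h2.1

theorem list_element_counting_spec : Claim_equal_list_element_counting := by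
  intro input_list comparison_list _hdom
  unfold Spec_list_element_counting list_element_counting list_element_counting_alt
  simp only []
  -- names for the intermediate values of port A
  set capped := input_list.map pyCapitalize with hcapped
  set p : String → Bool := fun food => comparison_list.contains (pyCapitalize food) with hp
  set zeroDict := comparison_list.foldl (fun d i => d.insert i (0 : Int)) PySem.Dict.empty with hzero
  set freq1 := zeroDict.items.foldl (fun d kv => d.modify kv.1 0 (· + kv.2)) (PySem.Dict.empty : PySem.Dict String Int) with hfreq1
  set transformed := capped.foldl (fun acc food => if comparison_list.contains (pyCapitalize food) then acc ++ [food] else acc) ([] : List String) with htr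
  set count := PySem.Dict.counter transformed with hcount
  set freq2 := count.items.foldl (fun d kv => d.modify kv.1 0 (· + kv.2)) freq1 with hfreq2
  set capCounts := PySem.Dict.counter capped with hcc
  set result := comparison_list.foldl (fun d e => d.insert e (capCounts.getD e 0)) (PySem.Dict.empty : PySem.Dict String Int) with hres
  -- transformed is a filter
  have h_trans : transformed = capped.filter p := by
    rw [htr]
    have := PySem.List.foldl_append_if p id capped []
    simpa [hp] using this
  -- every element of transformed lies in comparison_list and is capitalize-fixed
  have h_tr_mem : ∀ y ∈ transformed, y ∈ comparison_list ∧ pyCapitalize y = y := by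
    intro y hy
    rw [h_trans] at hy
    obtain ⟨hyc, hpy⟩ := List.mem_filter.mp hy
    obtain ⟨i, _, rfl⟩ := List.mem_map.mp hyc
    have hid := pyCapitalize_idem i
    refine ⟨?_, hid⟩
    rw [hp] at hpy
    simp only [hid] at hpy
    simpa using hpy
  -- keys
  have h_keysZ : zeroDict.keys = PySem.Set.ofList comparison_list := by
    rw [hzero, PySem.Dict.keys_foldl_insert]
    simp [PySem.Set.update_nil_left]
  have h_keys1 : freq1.keys = PySem.Set.ofList comparison_list := by
    rw [hfreq1, PySem.Dict.keys_foldl_modify_key zeroDict.items (fun kv => kv.1) 0 (fun _ kv => (· + kv.2))]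
    have : zeroDict.items.map (fun kv => kv.1) = zeroDict.keys := rfl
    rw [this, h_keysZ]
    simp [PySem.Set.update_nil_left, PySem.Set.ofList_ofList]
  have h_keys2 : freq2.keys = PySem.Set.ofList comparison_list := by
    rw [hfreq2, PySem.Dict.keys_foldl_modify_key count.items (fun kv => kv.1) 0 (fun _ kv => (· + kv.2))]
    have hkc : count.items.map (fun kv => kv.1) = count.keys := rfl
    rw [hkc, hcount, PySem.Dict.keys_counter, h_keys1, PySem.Set.update_eq_append_filter, PySem.Set.ofList_ofList]
    have : (PySem.Set.ofList transformed).filter (fun y => !(PySem.Set.contains (PySem.Set.ofList comparison_list) y)) = [] := by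
      apply List.filter_eq_nil_iff.mpr
      intro y hy
      have hyt : y ∈ transformed := by simpa [PySem.Set.mem_ofList] using hy
      have := (h_tr_mem y hyt).1
      simp [PySem.Set.contains, this]
    rw [this]
    simp
  have h_keysR : result.keys = PySem.Set.ofList comparison_list := by
    rw [hres, PySem.Dict.keys_foldl_insert]
    simp [PySem.Set.update_nil_left]
  -- nodup
  have h_nd2 : freq2.keys.Nodup := by rw [h_keys2]; exact PySem.Set.nodup_ofList comparison_list
  have h_ndR : result.keys.Nodup := by rw [h_keysR]; exact PySem.Set.nodup_ofList comparison_list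
  -- values of zeroDict are all 0
  have hz0 : ∀ q ∈ zeroDict.items, q.2 = 0 := by
    rw [hzero]
    have hempty : (PySem.Dict.empty : PySem.Dict String Int).items = [] := rfl
    exact items_val_zero comparison_list PySem.Dict.empty (by rw [hempty]; intro q hq; cases hq)
  -- freq1 is identically 0
  have h_getD1 : ∀ k, freq1.getD k 0 = 0 := by
    intro k
    rw [hfreq1, getD_foldl_modify_add]
    have : ((zeroDict.items.filter (fun q => q.1 == k)).map (·.2)).sum = 0 := by
      apply List.sum_eq_zero
      intro x hx
      obtain ⟨q, hq, rfl⟩ := List.mem_map.mp hx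
      exact hz0 q (List.mem_of_mem_filter hq)
    rw [this]
    simp
  -- freq2 value = count in transformed
  have h_getD2 : ∀ k, freq2.getD k 0 = (transformed.count k : Int) := by
    intro k
    rw [hfreq2, getD_foldl_modify_add, h_getD1]
    rw [hcount, PySem.Dict.items_counter]
    rw [List.filter_map]
    have hcomp : ((fun q : String × Int => q.1 == k) ∘ (fun j => (j, (transformed.count j : Int)))) = (fun j => j == k) := rfl
    rw [hcomp]
    by_cases hm : k ∈ transformed
    · have hmo : k ∈ PySem.Set.ofList transformed := by simpa [PySem.Set.mem_ofList] using hm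
      have hnd : (PySem.Set.ofList transformed).Nodup := PySem.Set.nodup_ofList transformed
      have hcnt1 : (PySem.Set.ofList transformed).count k = 1 := List.count_eq_one_of_mem hnd hmo
      have : (PySem.Set.ofList transformed).filter (fun j => j == k) = [k] := by
        rw [List.filter_beq, hcnt1]
        simp
      rw [this]
      simp
    · have hmo : k ∉ PySem.Set.ofList transformed := fun h => hm (by simpa [PySem.Set.mem_ofList] using h)
      have : (PySem.Set.ofList transformed).filter (fun j => j == k) = [] := by
        apply List.filter_eq_nil_iff.mpr
        intro j hj hjk
        exact hmo ((eq_of_beq hjk) ▸ hj)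
      rw [this]
      have : transformed.count k = 0 := List.count_eq_zero.mpr hm
      simp [this]
  -- result value
  have h_getDR : ∀ k, k ∈ comparison_list → result.getD k 0 = (capped.count k : Int) := by
    intro k hk
    rw [hres, getD_foldl_insert_const, if_pos hk, hcc, PySem.Dict.getD_counter]
  -- counts agree on comparison keys
  have h_counts : ∀ k, k ∈ comparison_list → (transformed.count k : Int) = (capped.count k : Int) := by
    intro k hk
    by_cases hm : k ∈ capped
    · obtain ⟨i, _, rfl⟩ := List.mem_map.mp hm
      have hid := pyCapitalize_idem i
      have hpk : p (pyCapitalize i) = true := by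
        rw [hp]
        simp only [hid]
        simpa using hk
      rw [h_trans, List.count_filter hpk]
    · have h1 : transformed.count k = 0 := by
        refine List.count_eq_zero.mpr (fun hmem => hm ?_)
        rw [h_trans] at hmem
        exact (List.mem_filter.mp hmem).1
      have h2 : capped.count k = 0 := List.count_eq_zero.mpr hm
      rw [h1, h2]
  -- assemble
  rw [PySem.Dict.items_eq_map_keys freq2 h_nd2 0, PySem.Dict.items_eq_map_keys result h_ndR 0,
      h_keys2, h_keysR]
  apply List.map_congr_left
  intro k hks
  have hk : k ∈ comparison_list := by simpa [PySem.Set.mem_ofList] using hks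
  rw [h_getD2, h_getDR k hk, h_counts k hk]
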